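-- pv_equiv track=rewrite | github.com/QuentinDeHaes/Unboundedness-for-1-VASS | helper_functions.py | DEPRECATED_cleanup_non_cyclables_DEPRECATED
-- ===== SOURCE A (Python) =====
-- def DEPRECATED_cleanup_non_cyclables_DEPRECATED(non_cyclables, cyclabe_increase: int, minimal_cyclable: int):
--     """
--     DEPRECATED
--     clean the non_cyclables so that each chain has only one value, and each value below minimal is removed
--     :param non_cyclables: the disequalities whether we allow taking the cycle
--     :param cyclabe_increase: the amount with which the countervalue increased when taking the cycle
--     :param minimal_cyclable: the minimal countervalue to take the value
--     :return: a dict where each chain has it's own bounded value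
--     O(V) if maximum amount of disequalities per node is fixed
--     # the amount of chains that are bounded is also limited by the minimum between the positive_cycle_value
--     # and the amount of disequalities, which makes us bounded by O(V) as long as
--     # the amount of disequalities is fixed
--     """
--     cleaned_non_cyclables = dict()
--     for non_cyclable in non_cyclables:
--         if non_cyclable < minimal_cyclable:
--             continue
--
--         value = (non_cyclable % cyclabe_increase)
--
--         if value in cleaned_non_cyclables:
--             if non_cyclable > cleaned_non_cyclables[non_cyclable % cyclabe_increase]:
--                 cleaned_non_cyclables[value] = non_cyclable
--
--         else:
--             cleaned_non_cyclables[value] = non_cyclable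
--
--     return cleaned_non_cyclables
-- ===== SOURCE B (Python) =====
-- def DEPRECATED_cleanup_non_cyclables_DEPRECATED(non_cyclables, cyclabe_increase: int, minimal_cyclable: int):
--     # Keep the values >= minimal_cyclable, find the maximum of each residue class by
--     # scanning the values in descending order (first hit per residue = its maximum),
--     # then emit one entry per residue in order of first appearance in the input.
--     kept = [x for x in non_cyclables if x >= minimal_cyclable]
--     best = {}
--     for x in sorted(kept, reverse=True):
--         r = x % cyclabe_increase
--         if r not in best:
--             best[r] = x
--     result = {}
--     for x in kept:
--         r = x % cyclabe_increase
--         if r not in result: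
--             result[r] = best[r]
--     return result
-- ===== Notes on version B (the rewrite author's own statement) =====
-- stated objective: alternative
-- what changed: B replaces A's streaming compare-and-update of a running maximum per residue by filtering the kept values, sorting them in descending order and taking the first value seen per residue class, then emitting one entry per residue in first-appearance order.
import Mathlib
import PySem

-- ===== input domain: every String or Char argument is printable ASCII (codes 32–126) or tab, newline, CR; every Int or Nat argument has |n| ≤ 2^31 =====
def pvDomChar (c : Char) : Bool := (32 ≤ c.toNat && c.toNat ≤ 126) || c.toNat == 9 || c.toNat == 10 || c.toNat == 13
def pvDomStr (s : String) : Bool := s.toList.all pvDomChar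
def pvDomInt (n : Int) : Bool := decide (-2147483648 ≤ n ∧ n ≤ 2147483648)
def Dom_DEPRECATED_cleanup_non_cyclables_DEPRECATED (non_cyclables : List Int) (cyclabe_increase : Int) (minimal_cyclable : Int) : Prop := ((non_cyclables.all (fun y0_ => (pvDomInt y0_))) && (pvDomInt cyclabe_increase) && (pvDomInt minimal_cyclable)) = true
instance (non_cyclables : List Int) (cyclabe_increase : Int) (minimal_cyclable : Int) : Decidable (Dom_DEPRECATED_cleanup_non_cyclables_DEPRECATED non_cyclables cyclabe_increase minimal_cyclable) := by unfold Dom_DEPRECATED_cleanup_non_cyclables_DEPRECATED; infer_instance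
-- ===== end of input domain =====

-- B keeps the per-residue maximum by sorting the kept values in descending order and taking
-- the first value seen per residue class (alternative decomposition; not claimed faster).

-- ===== PORT A =====
def DEPRECATED_cleanup_non_cyclables_DEPRECATED (non_cyclables : List Int) (cyclabe_increase : Int) (minimal_cyclable : Int) : List (Int × Int) :=
  (non_cyclables.foldl (fun cleaned non_cyclable =>
      if non_cyclable < minimal_cyclable then cleaned
      else
        let value := PySem.Int.mod non_cyclable cyclabe_increase
        if cleaned.contains value then
          -- 'cleaned[value]' read as getD; exact: the key is present on this branch
          if non_cyclable > cleaned.getD value 0 then cleaned.insert value non_cyclable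
          else cleaned
        else cleaned.insert value non_cyclable)
    PySem.Dict.empty).items

-- ===== PORT B =====
def DEPRECATED_cleanup_non_cyclables_DEPRECATED_alt (non_cyclables : List Int) (cyclabe_increase : Int) (minimal_cyclable : Int) : List (Int × Int) :=
  let kept := non_cyclables.filter (fun x => decide (minimal_cyclable ≤ x))
  let best := (PySem.List.sorted kept (fun x => x) true).foldl
      (fun b x =>
        let r := PySem.Int.mod x cyclabe_increase
        if b.contains r then b else b.insert r x)
      PySem.Dict.empty
  let result := kept.foldl
      (fun d x =>
        let r := PySem.Int.mod x cyclabe_increase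
        -- 'best[r]' read as getD; exact: r's class has a member in the sorted pass, so r ∈ best
        if d.contains r then d else d.insert r (best.getD r 0))
      PySem.Dict.empty
  result.items

-- ===== PRECONDITION & SPEC =====
-- Pre_ excludes exactly the inputs where Python A raises ZeroDivisionError:
-- cyclabe_increase == 0 while some element reaches the '%' (i.e. is ≥ minimal_cyclable).
def Pre_DEPRECATED_cleanup_non_cyclables_DEPRECATED (non_cyclables : List Int) (cyclabe_increase : Int) (minimal_cyclable : Int) : Prop :=
  cyclabe_increase ≠ 0 ∨ ∀ x ∈ non_cyclables, x < minimal_cyclable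
instance (non_cyclables : List Int) (cyclabe_increase : Int) (minimal_cyclable : Int) : Decidable (Pre_DEPRECATED_cleanup_non_cyclables_DEPRECATED non_cyclables cyclabe_increase minimal_cyclable) := by unfold Pre_DEPRECATED_cleanup_non_cyclables_DEPRECATED; infer_instance

def pvWitness_DEPRECATED_cleanup_non_cyclables_DEPRECATED : List Int × Int × Int := ([3, 5, 8, 2, 11], 3, 3)

def Spec_DEPRECATED_cleanup_non_cyclables_DEPRECATED (non_cyclables : List Int) (cyclabe_increase : Int) (minimal_cyclable : Int) (out : List (Int × Int)) : Prop := out = DEPRECATED_cleanup_non_cyclables_DEPRECATED_alt non_cyclables cyclabe_increase minimal_cyclable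
instance (non_cyclables : List Int) (cyclabe_increase : Int) (minimal_cyclable : Int) (out : List (Int × Int)) : Decidable (Spec_DEPRECATED_cleanup_non_cyclables_DEPRECATED non_cyclables cyclabe_increase minimal_cyclable out) := by unfold Spec_DEPRECATED_cleanup_non_cyclables_DEPRECATED; infer_instance

-- ===== CLAIM (what is proved, stated in full; the proofs are below) =====
def Claim_equal_DEPRECATED_cleanup_non_cyclables_DEPRECATED : Prop := ∀ (non_cyclables : List Int) (cyclabe_increase : Int) (minimal_cyclable : Int), Dom_DEPRECATED_cleanup_non_cyclables_DEPRECATED non_cyclables cyclabe_increase minimal_cyclable → Pre_DEPRECATED_cleanup_non_cyclables_DEPRECATED non_cyclables cyclabe_increase minimal_cyclable → Spec_DEPRECATED_cleanup_non_cyclables_DEPRECATED non_cyclables cyclabe_increase minimal_cyclable (DEPRECATED_cleanup_non_cyclables_DEPRECATED non_cyclables cyclabe_increase minimal_cyclable)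

-- ===== LEMMAS AND PROOFS =====

-- the residue of x, the kept elements of residue r, max of a nonempty list, first element of residue r
def pvResF (c x : Int) : Int := PySem.Int.mod x c
def pvFilt (c r : Int) (l : List Int) : List Int := l.filter (fun x => pvResF c x == r)
def pvMaxL (l : List Int) : Int := match l with | [] => 0 | y :: t => t.foldl max y
def pvFW (c : Int) (l : List Int) (r : Int) : Int := ((l.find? (fun x => pvResF c x == r)).getD 0)
-- the common canonical value of both dicts as item lists
def pvCanon (c : Int) (l : List Int) : List (Int × Int) :=
  (PySem.List.dedup (l.map (pvResF c))).map (fun r => (r, pvMaxL (pvFilt c r l)))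

theorem pv_find_eq (l : List Int) (a : Int) :
    l.find? (fun r => r == a) = if a ∈ l then some a else none := by
  induction l with
  | nil => simp
  | cons x t ih =>
    by_cases hx : x = a
    · simp [hx]
    · have hax : ¬ (a = x) := fun h => hx h.symm
      simp [hx, ih, hax]

theorem pv_get_mk (V : Int → Int) (ks : List Int) (r : Int) :
    (PySem.Dict.mk (ks.map (fun k => (k, V k)))).get? r
      = if r ∈ ks then some (V r) else none := by
  simp only [PySem.Dict.get?, List.find?_map]
  have : (fun (p : Int × Int) => p.1 == r) ∘ (fun k => (k, V k)) = fun k => k == r := rfl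
  rw [this, pv_find_eq]
  by_cases h : r ∈ ks <;> simp [h]

theorem pv_contains_mk (V : Int → Int) (ks : List Int) (r : Int) :
    (PySem.Dict.mk (ks.map (fun k => (k, V k)))).contains r = decide (r ∈ ks) := by
  rw [PySem.Dict.contains_eq_isSome_get?, pv_get_mk]
  by_cases h : r ∈ ks <;> simp [h]

theorem pv_guard (m : Int) (g : PySem.Dict Int Int → Int → PySem.Dict Int Int)
    (l : List Int) (d : PySem.Dict Int Int) :
    l.foldl (fun d x => if x < m then d else g d x) d
      = (l.filter (fun x => decide (m ≤ x))).foldl g d := by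
  induction l generalizing d with
  | nil => rfl
  | cons x t ih =>
    by_cases hx : x < m
    · have : decide (m ≤ x) = false := by simp; omega
      simp [List.foldl_cons, hx, this, ih]
    · have : decide (m ≤ x) = true := by simp; omega
      simp [List.foldl_cons, hx, this, ih]

theorem pvFilt_ne_nil (c r : Int) (l : List Int) (h : r ∈ l.map (pvResF c)) :
    pvFilt c r l ≠ [] := by
  obtain ⟨x, hx, hr⟩ := List.mem_map.mp h
  intro hnil
  have : x ∈ pvFilt c r l := by simp [pvFilt, hx, hr]
  simp [hnil] at this

theorem pvMax_spec (l : List Int) (h : l ≠ []) :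
    pvMaxL l ∈ l ∧ ∀ z ∈ l, z ≤ pvMaxL l := by
  cases l with
  | nil => exact absurd rfl h
  | cons y t =>
    constructor
    · rcases PySem.List.foldl_max_mem t y with h1 | h1 <;> simp [pvMaxL, h1]
    · intro z hz
      rcases List.mem_cons.mp hz with rfl | hz
      · exact (PySem.List.le_foldl_max t z).1
      · exact (PySem.List.le_foldl_max t y).2 z hz

theorem pvMax_append_singleton (ys : List Int) (x : Int) (h : ys ≠ []) :
    pvMaxL (ys ++ [x]) = max (pvMaxL ys) x := by
  cases ys with
  | nil => exact absurd rfl h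
  | cons y t => simp [pvMaxL, List.foldl_append]

theorem pvFilt_append_singleton (c r : Int) (l : List Int) (x : Int) :
    pvFilt c r (l ++ [x]) = pvFilt c r l ++ (if pvResF c x = r then [x] else []) := by
  by_cases hx : pvResF c x = r <;> simp [pvFilt, List.filter_append, hx]

-- A's loop (after the guard) produces the canonical item list.
theorem pvA_canon (c : Int) (l : List Int) :
    (l.foldl (fun cleaned x =>
        let value := PySem.Int.mod x c
        if cleaned.contains value then
          if x > cleaned.getD value 0 then cleaned.insert value x else cleaned
        else cleaned.insert value x)
      PySem.Dict.empty).items = pvCanon c l := by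
  induction l using List.reverseRecOn with
  | nil => rfl
  | append_singleton l x ih =>
    rw [List.foldl_append, List.foldl_cons, List.foldl_nil]
    -- name the dict accumulated so far and replace it by its canonical form
    have hD : (l.foldl (fun cleaned x =>
        let value := PySem.Int.mod x c
        if cleaned.contains value then
          if x > cleaned.getD value 0 then cleaned.insert value x else cleaned
        else cleaned.insert value x)
      PySem.Dict.empty) = PySem.Dict.mk (pvCanon c l) := by
      cases hE : (l.foldl (fun cleaned x =>
        let value := PySem.Int.mod x c
        if cleaned.contains value then
          if x > cleaned.getD value 0 then cleaned.insert value x else cleaned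
        else cleaned.insert value x)
      PySem.Dict.empty) with
      | mk items => rw [hE] at ih; simp only at ih; rw [ih]
    rw [hD]
    have hmapx : (l ++ [x]).map (pvResF c) = l.map (pvResF c) ++ [pvResF c x] := by
      simp
    have hstep : PySem.Int.mod x c = pvResF c x := rfl
    rw [hstep]
    by_cases hmem : pvResF c x ∈ l.map (pvResF c)
    · -- residue already present: dedup unchanged
      have hded : PySem.List.dedup ((l ++ [x]).map (pvResF c)) = PySem.List.dedup (l.map (pvResF c)) := by
        rw [hmapx, PySem.List.dedup_eq_ofList, PySem.List.dedup_eq_ofList,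
          PySem.Set.ofList_append_singleton, PySem.Set.add_of_mem]
        rw [PySem.Set.mem_ofList]; exact hmem
      have hcont : (PySem.Dict.mk (pvCanon c l)).contains (pvResF c x) = true := by
        unfold pvCanon; rw [pv_contains_mk]; simp [hmem]
      have hget : (PySem.Dict.mk (pvCanon c l)).getD (pvResF c x) 0 = pvMaxL (pvFilt c (pvResF c x) l) := by
        unfold pvCanon PySem.Dict.getD; rw [pv_get_mk]
        simp [hmem]
      have hfilt0 : pvFilt c (pvResF c x) (l ++ [x]) = pvFilt c (pvResF c x) l ++ [x] := by
        rw [pvFilt_append_singleton]; simp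
      have hmax0 : pvMaxL (pvFilt c (pvResF c x) (l ++ [x])) = max (pvMaxL (pvFilt c (pvResF c x) l)) x := by
        rw [hfilt0, pvMax_append_singleton _ _ (pvFilt_ne_nil c (pvResF c x) l hmem)]
      simp only [hcont, if_true]
      by_cases hgt : x > pvMaxL (pvFilt c (pvResF c x) l)
      · -- overwrite in place
        rw [hget]
        simp only [hgt, if_true]
        rw [PySem.Dict.items_insert_of_contains _ _ hcont]
        unfold pvCanon
        rw [hded, List.map_map]
        apply List.map_congr_left
        intro k hk
        by_cases hkr : k = (pvResF c x)
        · subst hkr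
          simp [hmax0, le_of_lt hgt]
        · have : pvFilt c k (l ++ [x]) = pvFilt c k l := by
            rw [pvFilt_append_singleton]; simp [Ne.symm hkr]
          simp [Function.comp, hkr, this]
      · -- keep: dict unchanged, canonical value also unchanged
        rw [hget]
        simp only [hgt, if_false]
        unfold pvCanon
        rw [hded]
        apply List.map_congr_left
        intro k hk
        by_cases hkr : k = (pvResF c x)
        · subst hkr
          have : max (pvMaxL (pvFilt c (pvResF c x) l)) x = pvMaxL (pvFilt c (pvResF c x) l) := by
            apply max_eq_left; omega
          simp [hmax0, this]
        · have : pvFilt c k (l ++ [x]) = pvFilt c k l := by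
            rw [pvFilt_append_singleton]; simp [Ne.symm hkr]
          simp [this]
    · -- new residue: appended at the end
      have hcont : (PySem.Dict.mk (pvCanon c l)).contains (pvResF c x) = false := by
        unfold pvCanon; rw [pv_contains_mk]; simp [hmem]
      have hded : PySem.List.dedup ((l ++ [x]).map (pvResF c))
          = PySem.List.dedup (l.map (pvResF c)) ++ [(pvResF c x)] := by
        rw [hmapx, PySem.List.dedup_eq_ofList, PySem.List.dedup_eq_ofList,
          PySem.Set.ofList_append_singleton, PySem.Set.add_of_not_mem]
        rw [PySem.Set.mem_ofList]; exact hmem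
      simp only [hcont, if_false, Bool.false_eq_true]
      rw [PySem.Dict.items_insert_of_not_contains _ _ hcont]
      unfold pvCanon
      rw [hded, List.map_append]
      congr 1
      · apply List.map_congr_left
        intro k hk
        have hkr : k ≠ (pvResF c x) := by
          intro h; subst h
          exact hmem ((PySem.List.mem_dedup _ _).mp hk)
        have : pvFilt c k (l ++ [x]) = pvFilt c k l := by
          rw [pvFilt_append_singleton]; simp [Ne.symm hkr]
        simp [this]
      · have : pvFilt c (pvResF c x) (l ++ [x]) = [x] := by
          rw [pvFilt_append_singleton]
          have : pvFilt c (pvResF c x) l = [] := by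
            by_contra hne
            rcases List.exists_mem_of_ne_nil _ hne with ⟨z, hz⟩
            simp only [pvFilt, List.mem_filter, beq_iff_eq] at hz
            exact hmem (List.mem_map.mpr ⟨z, hz.1, hz.2⟩)
          simp [this]
        simp [this, pvMaxL]

theorem pvFW_find_some (c : Int) (l : List Int) (r : Int) (h : r ∈ l.map (pvResF c)) :
    l.find? (fun x => pvResF c x == r) = some (pvFW c l r) := by
  rw [← List.head?_filter]
  have hne : l.filter (fun x => pvResF c x == r) ≠ [] := pvFilt_ne_nil c r l h
  cases hE : l.filter (fun x => pvResF c x == r) with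
  | nil => exact absurd hE hne
  | cons w t =>
    simp only [List.head?_cons]
    unfold pvFW
    rw [← List.head?_filter, hE]
    rfl

theorem pvFW_mem_res (c : Int) (l : List Int) (r : Int) (h : r ∈ l.map (pvResF c)) :
    pvFW c l r ∈ l ∧ pvResF c (pvFW c l r) = r := by
  have hf := pvFW_find_some c l r h
  exact ⟨List.mem_of_find?_eq_some hf, by simpa using List.find?_some hf⟩

theorem pvFW_append_mem (c : Int) (l : List Int) (x : Int) (r : Int) (h : r ∈ l.map (pvResF c)) :
    pvFW c (l ++ [x]) r = pvFW c l r := by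
  unfold pvFW
  rw [← List.head?_filter, ← List.head?_filter, List.filter_append,
    List.head?_append_of_ne_nil _
      (show l.filter (fun x => pvResF c x == r) ≠ [] from pvFilt_ne_nil c r l h)]

theorem pvFW_append_self_notmem (c : Int) (l : List Int) (x : Int)
    (h : pvResF c x ∉ l.map (pvResF c)) :
    pvFW c (l ++ [x]) (pvResF c x) = x := by
  unfold pvFW
  rw [← List.head?_filter, List.filter_append]
  have h1 : l.filter (fun y => pvResF c y == pvResF c x) = [] := by
    by_contra hne
    rcases List.exists_mem_of_ne_nil _ hne with ⟨z, hz⟩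
    simp only [List.mem_filter, beq_iff_eq] at hz
    exact h (List.mem_map.mpr ⟨z, hz.1, hz.2⟩)
  rw [h1]
  simp

-- first-wins loop with stored value v x produces the keys in first-appearance order
-- with the value taken from the first element of each residue class.
theorem pvFW_canon (c : Int) (v : Int → Int) (l : List Int) :
    (l.foldl (fun d x =>
        let r := PySem.Int.mod x c
        if d.contains r then d else d.insert r (v x))
      PySem.Dict.empty).items
      = (PySem.List.dedup (l.map (pvResF c))).map (fun r => (r, v (pvFW c l r))) := by
  induction l using List.reverseRecOn with
  | nil => rfl
  | append_singleton l x ih =>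
    rw [List.foldl_append, List.foldl_cons, List.foldl_nil]
    have hD : (l.foldl (fun d x =>
        let r := PySem.Int.mod x c
        if d.contains r then d else d.insert r (v x))
      PySem.Dict.empty)
        = PySem.Dict.mk ((PySem.List.dedup (l.map (pvResF c))).map (fun r => (r, v (pvFW c l r)))) := by
      cases hE : (l.foldl (fun d x =>
        let r := PySem.Int.mod x c
        if d.contains r then d else d.insert r (v x))
      PySem.Dict.empty) with
      | mk items => rw [hE] at ih; simp only at ih; rw [ih]
    rw [hD]
    have hmapx : (l ++ [x]).map (pvResF c) = l.map (pvResF c) ++ [pvResF c x] := by simp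
    rw [show PySem.Int.mod x c = pvResF c x from rfl]
    by_cases hmem : pvResF c x ∈ l.map (pvResF c)
    · have hded : PySem.List.dedup ((l ++ [x]).map (pvResF c)) = PySem.List.dedup (l.map (pvResF c)) := by
        rw [hmapx, PySem.List.dedup_eq_ofList, PySem.List.dedup_eq_ofList,
          PySem.Set.ofList_append_singleton, PySem.Set.add_of_mem]
        rw [PySem.Set.mem_ofList]; exact hmem
      have hcont : (PySem.Dict.mk ((PySem.List.dedup (l.map (pvResF c))).map
          (fun r => (r, v (pvFW c l r))))).contains (pvResF c x) = true := by
        rw [pv_contains_mk]; simp [hmem]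
      simp only [hcont, if_true]
      rw [hded]
      apply List.map_congr_left
      intro k hk
      rw [pvFW_append_mem c l x k ((PySem.List.mem_dedup _ _).mp hk)]
    · have hded : PySem.List.dedup ((l ++ [x]).map (pvResF c))
          = PySem.List.dedup (l.map (pvResF c)) ++ [pvResF c x] := by
        rw [hmapx, PySem.List.dedup_eq_ofList, PySem.List.dedup_eq_ofList,
          PySem.Set.ofList_append_singleton, PySem.Set.add_of_not_mem]
        rw [PySem.Set.mem_ofList]; exact hmem
      have hcont : (PySem.Dict.mk ((PySem.List.dedup (l.map (pvResF c))).map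
          (fun r => (r, v (pvFW c l r))))).contains (pvResF c x) = false := by
        rw [pv_contains_mk]; simp [hmem]
      simp only [hcont, if_false, Bool.false_eq_true]
      rw [PySem.Dict.items_insert_of_not_contains _ _ hcont]
      rw [hded, List.map_append]
      congr 1
      · apply List.map_congr_left
        intro k hk
        rw [pvFW_append_mem c l x k ((PySem.List.mem_dedup _ _).mp hk)]
      · simp only [List.map_cons, List.map_nil, List.cons.injEq, and_true]
        rw [pvFW_append_self_notmem c l x hmem]

-- the first element of residue r in the descending sort of l is the max of that class in l
theorem pvFW_sorted_eq_max (c : Int) (l : List Int) (r : Int) (h : r ∈ l.map (pvResF c)) :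
    pvFW c (PySem.List.sorted l (fun x => x) true) r = pvMaxL (pvFilt c r l) := by
  have hmemsd : r ∈ (PySem.List.sorted l (fun x => x) true).map (pvResF c) := by
    rcases List.mem_map.mp h with ⟨x0, hx0, hr0⟩
    exact List.mem_map.mpr ⟨x0, (PySem.List.mem_sorted l _ true x0).mpr hx0, hr0⟩
  -- the filtered descending sort is pairwise ≥, so its head is the class maximum
  have hpw : ((PySem.List.sorted l (fun x => x) true).filter
      (fun y => pvResF c y == r)).Pairwise (fun a b => b ≤ a) :=
    List.Pairwise.filter _ (PySem.List.sorted_pairwise_rev l (fun x => x))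
  have hfind := pvFW_find_some c (PySem.List.sorted l (fun x => x) true) r hmemsd
  rw [← List.head?_filter] at hfind
  cases hE : (PySem.List.sorted l (fun x => x) true).filter (fun y => pvResF c y == r) with
  | nil => rw [hE] at hfind; simp at hfind
  | cons w t =>
    rw [hE] at hfind hpw
    simp only [List.head?_cons, Option.some.injEq] at hfind
    -- w is a member of the class in l, and bounds every member of the class in l
    have hclass : ∀ z : Int, z ∈ pvFilt c r l ↔ z ∈ w :: t := by
      intro z
      rw [← hE]
      simp only [pvFilt, List.mem_filter, PySem.List.mem_sorted]
    have hwmem : w ∈ pvFilt c r l := (hclass w).mpr (List.mem_cons_self)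
    have hwub : ∀ z ∈ pvFilt c r l, z ≤ w := by
      intro z hz
      rcases List.mem_cons.mp ((hclass z).mp hz) with rfl | hzt
      · exact le_refl z
      · exact (List.pairwise_cons.mp hpw).1 z hzt
    have hne : pvFilt c r l ≠ [] := pvFilt_ne_nil c r l h
    have hmax := pvMax_spec (pvFilt c r l) hne
    rw [← hfind]
    exact le_antisymm (hmax.2 w hwmem) (hwub _ hmax.1)

-- ===== VERDICT (by name: the statement is the Claim_ definition above) =====
theorem DEPRECATED_cleanup_non_cyclables_DEPRECATED_spec : Claim_equal_DEPRECATED_cleanup_non_cyclables_DEPRECATED := by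
  intro l c m _ _
  unfold Spec_DEPRECATED_cleanup_non_cyclables_DEPRECATED
  unfold DEPRECATED_cleanup_non_cyclables_DEPRECATED DEPRECATED_cleanup_non_cyclables_DEPRECATED_alt
  rw [pv_guard]
  set kept := l.filter (fun x => decide (m ≤ x)) with hkept
  rw [pvA_canon]
  rw [pvFW_canon c (fun x =>
    (((PySem.List.sorted kept (fun x => x) true).foldl
      (fun b x =>
        let r := PySem.Int.mod x c
        if b.contains r then b else b.insert r x)
      PySem.Dict.empty)).getD (PySem.Int.mod x c) 0) kept]
  unfold pvCanon
  apply List.map_congr_left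
  intro r hr
  have hr' : r ∈ kept.map (pvResF c) := (PySem.List.mem_dedup _ _).mp hr
  simp only [Prod.mk.injEq, true_and]
  -- rewrite best as its canonical dict
  have hbest : ((PySem.List.sorted kept (fun x => x) true).foldl
      (fun b x =>
        let r := PySem.Int.mod x c
        if b.contains r then b else b.insert r x)
      PySem.Dict.empty)
      = PySem.Dict.mk ((PySem.List.dedup ((PySem.List.sorted kept (fun x => x) true).map (pvResF c))).map
          (fun r => (r, (fun x => x) (pvFW c (PySem.List.sorted kept (fun x => x) true) r)))) := by
    have h := pvFW_canon c (fun x => x) (PySem.List.sorted kept (fun x => x) true)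
    cases hE : ((PySem.List.sorted kept (fun x => x) true).foldl
      (fun b x =>
        let r := PySem.Int.mod x c
        if b.contains r then b else b.insert r x)
      PySem.Dict.empty) with
    | mk items => rw [hE] at h; simp only at h; rw [h]
  rw [hbest]
  -- r's first element in kept has residue r
  have hres := pvFW_mem_res c kept r hr'
  rw [show PySem.Int.mod (pvFW c kept r) c = pvResF c (pvFW c kept r) from rfl, hres.2]
  -- look r up in best's canonical item list
  have hmemsd : r ∈ (PySem.List.sorted kept (fun x => x) true).map (pvResF c) := by
    rcases List.mem_map.mp hr' with ⟨x0, hx0, hrx⟩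
    exact List.mem_map.mpr ⟨x0, (PySem.List.mem_sorted kept _ true x0).mpr hx0, hrx⟩
  unfold PySem.Dict.getD
  rw [pv_get_mk]
  simp only [PySem.List.mem_dedup, hmemsd, if_true, Option.getD_some]
  exact (pvFW_sorted_eq_max c kept r hr').symm
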